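-- pv_equiv track=rewrite | github.com/LiorSB/url-shortener | back_end/utils.py | encode_b62
-- ===== SOURCE A (Python) =====
-- BASE62 = '0123456789abcdefghijklmnopqrstuvwxyzABCDEFGHIJKLMNOPQRSTUVWXYZ'
--
-- def encode_b62(number: int) -> str:
--     """
--     Encode a positive number into Base X and return the string.
--
--     Args:
--         number (int): The number to encode.
--
--     Returns:
--         str: Encoded string in base 62
--     """
--     if number == 0:
--         return BASE62[0]
--
--     array = []
--     arr_append = array.append  # Extract bound-method for faster access.
--     _divmod = divmod  # Access to locals is faster.
--     base = len(BASE62)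
--
--     while number:
--         number, rem = _divmod(number, base)
--         arr_append(BASE62[rem])
--
--     array.reverse()
--
--     return ''.join(array)
-- ===== SOURCE B (Python) =====
-- BASE62 = '0123456789abcdefghijklmnopqrstuvwxyzABCDEFGHIJKLMNOPQRSTUVWXYZ'
--
--
-- def encode_b62(number: int) -> str:
--     if number == 0:
--         return BASE62[0]
--
--     p = 1
--     while p * 62 <= number:
--         p *= 62
--
--     out = ''
--     while p > 0:
--         out += BASE62[number // p]
--         number %= p
--         p //= 62
--
--     return out
-- ===== Notes on version B (the rewrite author's own statement) =====
-- stated objective: alternative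
-- what changed: Instead of A's LSB-first divmod loop with a list accumulator, reverse and join, B first finds the largest power of 62 not exceeding the number and then emits digits most-significant-first by dividing by descending powers, so no accumulator list and no reverse are needed.
-- outside the precondition, e.g. on encode_b62(-1): A does not finish within the time limit, B returns 'Z'
import Mathlib
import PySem

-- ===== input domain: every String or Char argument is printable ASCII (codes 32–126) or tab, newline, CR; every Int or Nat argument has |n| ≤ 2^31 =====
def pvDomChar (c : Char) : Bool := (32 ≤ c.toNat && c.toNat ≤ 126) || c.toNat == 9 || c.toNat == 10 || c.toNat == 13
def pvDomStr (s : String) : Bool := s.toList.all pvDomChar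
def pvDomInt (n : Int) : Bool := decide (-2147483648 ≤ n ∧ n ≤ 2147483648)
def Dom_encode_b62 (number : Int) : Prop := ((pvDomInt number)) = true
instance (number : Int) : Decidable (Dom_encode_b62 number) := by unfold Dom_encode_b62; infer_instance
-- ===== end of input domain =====

-- B replaces A's LSB-first divmod loop + reverse/join by a different algorithm: find the
-- largest power of 62 not exceeding the number, then emit digits most-significant-first
-- by dividing by descending powers — no accumulator list and no reverse (objective: alternative).


-- ===== PORT A =====
def pvBASE62 : List Char :=
  "0123456789abcdefghijklmnopqrstuvwxyzABCDEFGHIJKLMNOPQRSTUVWXYZ".toList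

-- BASE62[i]; the .getD is only a totality guard (the index is always in range here)
def pvDigit (r : Int) : Char := (PySem.List.pyGet? pvBASE62 r).getD ' '

-- the while-loop of A; fuel is only a totality guard (number.toNat + 1 suffices on Pre_)
def pvLoopA : Nat → Int → List Char → List Char
  | 0, _, acc => acc
  | fuel + 1, number, acc =>
    if number = 0 then acc
    else
      pvLoopA fuel (PySem.Int.floordiv number 62)
        (acc ++ [pvDigit (PySem.Int.mod number 62)])

def encode_b62 (number : Int) : String :=
  if number = 0 then String.ofList [pvBASE62.headD ' ']
  else String.ofList ((pvLoopA (number.toNat + 1) number []).reverse)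

-- ===== PORT B =====
-- first while-loop of B: the largest power of 62 ≤ number; fuel is only a totality guard
def pvPowLoop : Nat → Int → Int → Int
  | 0, p, _ => p
  | fuel + 1, p, number => if p * 62 ≤ number then pvPowLoop fuel (p * 62) number else p

-- second while-loop of B: emit digits MSB-first by descending powers; fuel = totality guard
def pvOutLoop : Nat → Int → Int → String → String
  | 0, _, _, out => out
  | fuel + 1, number, p, out =>
    if 0 < p then
      pvOutLoop fuel (PySem.Int.mod number p) (PySem.Int.floordiv p 62)
        (out ++ String.ofList [pvDigit (PySem.Int.floordiv number p)])
    else out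

def encode_b62_alt (number : Int) : String :=
  if number = 0 then String.ofList [pvBASE62.headD ' ']
  else
    pvOutLoop (number.toNat + 1) number (pvPowLoop (number.toNat + 1) 1 number) ""

-- ===== PRECONDITION & SPEC =====
-- Pre_ excludes negative numbers: there A's while-loop never terminates (divmod keeps
-- number at -1 forever), so A returns nothing to match.
def Pre_encode_b62 (number : Int) : Prop := 0 ≤ number
instance (number : Int) : Decidable (Pre_encode_b62 number) := by
  unfold Pre_encode_b62; infer_instance

def pvWitness_encode_b62 : Int := (12345)

def Spec_encode_b62 (number : Int) (out : String) : Prop := out = encode_b62_alt number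
instance (number : Int) (out : String) : Decidable (Spec_encode_b62 number out) := by
  unfold Spec_encode_b62; infer_instance

-- ===== CLAIM (what is proved, stated in full; the proofs are below) =====
def Claim_equal_encode_b62 : Prop :=
  ∀ (number : Int), Dom_encode_b62 number → Pre_encode_b62 number →
    Spec_encode_b62 number (encode_b62 number)

-- ===== LEMMAS AND PROOFS =====

-- canonical MSB-first digit string of a natural number (empty for 0)
def pvDigitN (m : Nat) : Char := pvDigit (m : Int)

def digsC (n : Nat) : List Char :=
  if h : n = 0 then [] else digsC (n / 62) ++ [pvDigitN (n % 62)]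
decreasing_by exact Nat.div_lt_self (Nat.pos_of_ne_zero h) (by norm_num)

-- exactly k+1 digits of n, MSB first (possibly with leading zeros)
def padC : Nat → Nat → List Char
  | 0, n => [pvDigitN n]
  | k + 1, n => pvDigitN (n / 62 ^ (k + 1)) :: padC k (n % 62 ^ (k + 1))

-- A's loop only appends to its accumulator
lemma pvLoopA_acc (fuel : Nat) :
    ∀ (n : Int) (acc : List Char), pvLoopA fuel n acc = acc ++ pvLoopA fuel n [] := by
  induction fuel with
  | zero => intro n acc; simp [pvLoopA]
  | succ f ih =>
    intro n acc
    by_cases hn : n = 0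
    · simp [pvLoopA, hn]
    · simp only [pvLoopA, if_neg hn]
      rw [ih _ (acc ++ _), ih _ ([] ++ _)]
      simp

-- the reversed digit list of A's loop is the canonical digit string
lemma pvLoopA_eq_digsC : ∀ (f : Nat) (n : Int), 0 ≤ n → n.toNat < f →
    (pvLoopA f n []).reverse = digsC n.toNat := by
  intro f
  induction f with
  | zero => intro n _ hf; omega
  | succ f ih =>
    intro n h0 hf
    by_cases hn : n = 0
    · simp [pvLoopA, hn, digsC]
    · simp only [pvLoopA, if_neg hn, List.nil_append]
      obtain ⟨m, rfl⟩ : ∃ m : Nat, n = (m : Int) := ⟨n.toNat, (Int.toNat_of_nonneg h0).symm⟩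
      rw [pvLoopA_acc f _ [pvDigit (PySem.Int.mod (m : Int) 62)]]
      rw [List.reverse_append]
      rw [show PySem.Int.floordiv (m : Int) 62 = ((m / 62 : Nat) : Int) by
        exact_mod_cast PySem.Int.floordiv_natCast m 62]
      rw [ih _ (by positivity) (by simp at hf ⊢; omega)]
      rw [show PySem.Int.mod (m : Int) 62 = ((m % 62 : Nat) : Int) by
        exact_mod_cast PySem.Int.mod_natCast m 62]
      have hm : ¬ m = 0 := by exact_mod_cast hn
      rw [show ((m : Int)).toNat = m from rfl,
        show digsC m = digsC (m / 62) ++ [pvDigitN (m % 62)] by rw [digsC, dif_neg hm]]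
      have hcast : ((m : Int) / 62).toNat = m / 62 := by omega
      simp [pvDigitN, hcast]

-- peeling the least-significant digit off a padded digit string
lemma padC_succ : ∀ (k n : Nat), padC (k + 1) n = padC k (n / 62) ++ [pvDigitN (n % 62)] := by
  intro k
  induction k with
  | zero => intro n; simp [padC]
  | succ k ih =>
    intro n
    show pvDigitN (n / 62 ^ (k + 2)) :: padC (k + 1) (n % 62 ^ (k + 2)) = _
    rw [ih (n % 62 ^ (k + 2))]
    have h1 : n % 62 ^ (k + 2) / 62 = n / 62 % 62 ^ (k + 1) := by
      rw [show 62 ^ (k + 2) = 62 * 62 ^ (k + 1) by ring]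
      rw [Nat.mod_mul_right_div_self]
    have h2 : n % 62 ^ (k + 2) % 62 = n % 62 := by
      exact Nat.mod_mod_of_dvd n ⟨62 ^ (k + 1), by ring⟩
    have h3 : n / 62 / 62 ^ (k + 1) = n / 62 ^ (k + 2) := by
      rw [Nat.div_div_eq_div_mul]; ring_nf
    simp [padC, h1, h2, h3]

-- with no leading zero the padded string is the canonical one
lemma padC_eq_digsC : ∀ (k n : Nat), 62 ^ k ≤ n → n < 62 ^ (k + 1) → padC k n = digsC n := by
  intro k
  induction k with
  | zero =>
    intro n h1 h2
    simp at h1 h2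
    have hn : ¬ n = 0 := by omega
    rw [digsC, dif_neg hn, Nat.div_eq_of_lt h2, Nat.mod_eq_of_lt h2, digsC]
    simp [padC]
  | succ k ih =>
    intro n h1 h2
    have hpos : 0 < 62 ^ (k + 1) := by positivity
    have hn : ¬ n = 0 := by omega
    rw [padC_succ, digsC, dif_neg hn]
    congr 1
    apply ih
    · rw [Nat.le_div_iff_mul_le (by norm_num)]
      calc 62 ^ k * 62 = 62 ^ (k + 1) := by ring
        _ ≤ n := h1
    · rw [Nat.div_lt_iff_lt_mul (by norm_num)]
      calc n < 62 ^ (k + 2) := h2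
        _ = 62 ^ (k + 1) * 62 := by ring

-- B's first loop returns the largest power of 62 not exceeding number
lemma pvPowLoop_spec : ∀ (f : Nat) (p n : Int), 0 < n → (∃ j : Nat, p = 62 ^ j) →
    p ≤ n → (n - p).toNat < f →
    ∃ k : Nat, pvPowLoop f p n = 62 ^ k ∧ (62:Int) ^ k ≤ n ∧ n < 62 ^ (k + 1) := by
  intro f
  induction f with
  | zero => intro p n h0 _ hple hf; omega
  | succ f ih =>
    intro p n h0 hpow hple hf
    obtain ⟨j, rfl⟩ := hpow
    by_cases h : (62:Int) ^ j * 62 ≤ n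
    · simp only [pvPowLoop, if_pos h]
      have hp1 : (1:Int) ≤ 62 ^ j := one_le_pow₀ (by norm_num)
      exact ih _ n h0 ⟨j + 1, by ring⟩ (by linarith [h]; ) (by
        have : (62:Int) ^ j * 62 = 62 ^ j + 62 ^ j * 61 := by ring
        omega)
    · simp only [pvPowLoop, if_neg h]
      exact ⟨j, rfl, hple, by rw [pow_succ]; omega⟩

-- p = 0 ends B's second loop at once
lemma pvOutLoop_zero (f : Nat) (n : Int) (out : String) : pvOutLoop f n 0 out = out := by
  cases f <;> simp [pvOutLoop]

-- B's second loop emits the padded digit string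
lemma pvOutLoop_spec : ∀ (k : Nat) (f : Nat) (n : Int) (out : String), 0 ≤ n →
    n < 62 ^ (k + 1) → k < f →
    pvOutLoop f n ((62:Int) ^ k) out = out ++ String.ofList (padC k n.toNat) := by
  intro k
  induction k with
  | zero =>
    intro f n out h0 hlt hf
    obtain ⟨f, rfl⟩ : ∃ f' : Nat, f = f' + 1 := ⟨f - 1, by omega⟩
    obtain ⟨m, rfl⟩ : ∃ m : Nat, n = (m : Int) := ⟨n.toNat, (Int.toNat_of_nonneg h0).symm⟩
    simp only [pvOutLoop, pow_zero, if_pos (by norm_num : (0:Int) < 1)]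
    rw [show PySem.Int.mod (m : Int) 1 = ((m % 1 : Nat) : Int) from PySem.Int.mod_natCast m 1]
    rw [show PySem.Int.floordiv (m : Int) 1 = ((m / 1 : Nat) : Int) from
      PySem.Int.floordiv_natCast m 1]
    rw [show PySem.Int.floordiv (1 : Int) 62 = ((1 / 62 : Nat) : Int) by
      exact_mod_cast PySem.Int.floordiv_natCast 1 62]
    simp [pvOutLoop_zero, padC, pvDigitN]
  | succ k ih =>
    intro f n out h0 hlt hf
    obtain ⟨f, rfl⟩ : ∃ f' : Nat, f = f' + 1 := ⟨f - 1, by omega⟩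
    obtain ⟨m, rfl⟩ : ∃ m : Nat, n = (m : Int) := ⟨n.toNat, (Int.toNat_of_nonneg h0).symm⟩
    have hp : (0:Int) < 62 ^ (k + 1) := by positivity
    simp only [pvOutLoop, if_pos hp]
    rw [show ((62:Int) ^ (k + 1)) = ((62 ^ (k + 1) : Nat) : Int) by push_cast; ring]
    rw [PySem.Int.mod_natCast m (62 ^ (k + 1)), PySem.Int.floordiv_natCast m (62 ^ (k + 1))]
    rw [show PySem.Int.floordiv (((62 ^ (k + 1) : Nat) : Int)) 62
          = (((62 ^ (k + 1) / 62 : Nat)) : Int) by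
      exact_mod_cast PySem.Int.floordiv_natCast (62 ^ (k + 1)) 62]
    have hdiv : (62 ^ (k + 1) / 62 : Nat) = 62 ^ k := by
      rw [pow_succ, Nat.mul_div_cancel _ (by norm_num)]
    rw [hdiv, show ((62 ^ k : Nat) : Int) = (62:Int) ^ k by push_cast; ring]
    rw [ih f ((m % 62 ^ (k + 1) : Nat) : Int) _ (by positivity)
      (by exact_mod_cast Nat.mod_lt m (by positivity)) (by omega)]
    simp only [Int.toNat_natCast, padC]
    rw [String.append_assoc, ← String.ofList_append, List.singleton_append, pvDigitN]

-- ===== VERDICT (by name: the statement is the Claim_ definition above) =====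
theorem encode_b62_spec : Claim_equal_encode_b62 := by
  intro number _ hpre
  unfold Spec_encode_b62 encode_b62 encode_b62_alt
  by_cases hn : number = 0
  · simp [hn]
  · rw [if_neg hn, if_neg hn]
    have h0 : 0 < number := lt_of_le_of_ne hpre (Ne.symm hn)
    obtain ⟨k, hpw, hle, hlt⟩ := pvPowLoop_spec (number.toNat + 1) 1 number h0
      ⟨0, by norm_num⟩ (by omega) (by omega)
    have hleN : 62 ^ k ≤ number.toNat := by
      have h : ((62 ^ k : Nat) : Int) ≤ number := by push_cast; exact hle
      omega
    have hltN : number.toNat < 62 ^ (k + 1) := by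
      have h : number < ((62 ^ (k + 1) : Nat) : Int) := by push_cast; exact hlt
      omega
    have hkle : k < 62 ^ k := Nat.lt_pow_self (by norm_num)
    rw [hpw]
    rw [pvOutLoop_spec k (number.toNat + 1) number "" (le_of_lt h0) hlt (by omega)]
    rw [pvLoopA_eq_digsC _ number (le_of_lt h0) (by omega)]
    rw [padC_eq_digsC k number.toNat hleN hltN]
    simp
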